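-- pv_equiv track=rewrite | github.com/TomHigginson/Advent-of-Code | 2025/Day4_PrintingDepartment.py | accessible
-- ===== SOURCE A (Python) =====
-- def accessible(paper):
--     """
--     Identifies of each individual roll of paper is accessible
--     """
--
--     rows = len(paper)
--     cols = len(paper[0])
--     nodes = 0
--
--     #Listing all possible directions
--     directions = [(-1,-1),(-1,0),(-1,1),(0,-1),(0,1),(1,-1),(1,0),(1,1)]
--     output = []
--
--     for i in range(rows):
--         row = []
--         for j in range(cols):
--             if paper[i][j] == "@":
--                 count = 0
--                 for dx, dy in directions:
--                     ni = i+dx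
--                     nj = j+dy
--                     if 0 <= ni < rows and 0 <= nj < cols:
--                         if paper[ni][nj] == "@":
--                             count += 1
--                 if count < 4:
--                     nodes += 1
--
--                 row.append(str(count))
--             else:
--                 row.append(".")
--         output.append(row)
--     return output,nodes
-- ===== SOURCE B (Python) =====
-- def accessible(paper):
--     """
--     Identifies of each individual roll of paper is accessible
--     """
--     rows = len(paper)
--     cols = len(paper[0])
--
--     # Stage 1: 0/1 indicator grid of rolls.
--     at = [[1 if paper[i][j] == "@" else 0 for j in range(cols)]
--           for i in range(rows)]
--
--     # Stage 2: separable 3x3 box convolution — first horizontal 3-sums ...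
--     h = [[(row[j - 1] if j > 0 else 0) + row[j] +
--           (row[j + 1] if j + 1 < cols else 0) for j in range(cols)]
--          for row in at]
--
--     # ... then vertical 3-sums of h give the 3x3 window sum; subtract the
--     # cell itself to count only the 8 neighbours.
--     output = []
--     nodes = 0
--     for i in range(rows):
--         row = []
--         for j in range(cols):
--             if at[i][j]:
--                 count = ((h[i - 1][j] if i > 0 else 0) + h[i][j] +
--                          (h[i + 1][j] if i + 1 < rows else 0)) - 1
--                 if count < 4:
--                     nodes += 1
--                 row.append(str(count))
--             else:
--                 row.append(".")
--         output.append(row)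
--     return output, nodes
-- ===== Notes on version B (the rewrite author's own statement) =====
-- stated objective: alternative
-- what changed: B replaces A's per-cell 8-direction bounds-checked gather by a staged separable 3x3 box convolution: a 0/1 indicator grid, then a grid of horizontal 3-sums, then vertical 3-sums of that grid minus the cell itself give each neighbour count.
import Mathlib
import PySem

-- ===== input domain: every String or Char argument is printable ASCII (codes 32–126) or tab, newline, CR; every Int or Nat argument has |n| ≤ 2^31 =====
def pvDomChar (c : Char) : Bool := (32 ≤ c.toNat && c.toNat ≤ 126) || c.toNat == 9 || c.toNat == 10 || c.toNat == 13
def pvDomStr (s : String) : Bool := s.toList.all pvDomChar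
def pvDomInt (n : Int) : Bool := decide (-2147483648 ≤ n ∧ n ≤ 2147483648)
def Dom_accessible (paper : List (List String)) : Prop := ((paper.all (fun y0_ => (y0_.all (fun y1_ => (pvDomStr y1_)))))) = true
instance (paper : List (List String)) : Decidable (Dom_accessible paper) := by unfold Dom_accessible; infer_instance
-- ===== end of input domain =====

-- B replaces A's per-cell 8-direction gather by a staged separable 3x3 box convolution
-- (indicator grid, horizontal 3-sums, then vertical 3-sums minus the cell); objective:
-- alternative decomposition, same asymptotic cost.

-- ===== PORT A =====
def accessible (paper : List (List String)) : List (List String) × Int :=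
  let rows : Int := paper.length
  let cols : Int := ((PySem.List.pyGet? paper 0).getD []).length
  let directions : List (Int × Int) :=
    [(-1,-1),(-1,0),(-1,1),(0,-1),(0,1),(1,-1),(1,0),(1,1)]
  (PySem.List.pyRange 0 rows 1).foldl (fun acc i =>
    let res := (PySem.List.pyRange 0 cols 1).foldl (fun racc j =>
      if PySem.List.pyGetD (PySem.List.pyGetD paper i []) j "" == "@" then
        let count := directions.foldl (fun c d =>
          let ni := i + d.1
          let nj := j + d.2
          if decide (0 ≤ ni) && decide (ni < rows) && decide (0 ≤ nj) && decide (nj < cols) then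
            if PySem.List.pyGetD (PySem.List.pyGetD paper ni []) nj "" == "@" then c + 1 else c
          else c) (0 : Int)
        let nodes := if count < 4 then racc.2 + 1 else racc.2
        (racc.1 ++ [PySem.Int.toStr count], nodes)
      else (racc.1 ++ ["."], racc.2)) (([] : List String), acc.2)
    (acc.1 ++ [res.1], res.2)) (([] : List (List String)), (0 : Int))

-- ===== PORT B =====
-- List indexing in B (at[i][j], row[j-1], h[i-1][j]) is only reached with in-range
-- nonnegative indices, where pyGetD is exact Python indexing.
def accessible_alt (paper : List (List String)) : List (List String) × Int :=
  let rows : Int := paper.length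
  let cols : Int := ((PySem.List.pyGet? paper 0).getD []).length
  let atG : List (List Int) := (PySem.List.pyRange 0 rows 1).map (fun i =>
    (PySem.List.pyRange 0 cols 1).map (fun j =>
      if PySem.List.pyGetD (PySem.List.pyGetD paper i []) j "" == "@" then (1 : Int) else 0))
  let hG : List (List Int) := atG.map (fun row =>
    (PySem.List.pyRange 0 cols 1).map (fun j =>
      (if 0 < j then PySem.List.pyGetD row (j - 1) 0 else 0) + PySem.List.pyGetD row j 0 +
      (if j + 1 < cols then PySem.List.pyGetD row (j + 1) 0 else 0)))
  (PySem.List.pyRange 0 rows 1).foldl (fun acc i =>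
    let res := (PySem.List.pyRange 0 cols 1).foldl (fun racc j =>
      if PySem.List.pyGetD (PySem.List.pyGetD atG i []) j 0 ≠ 0 then
        let count :=
          ((if 0 < i then PySem.List.pyGetD (PySem.List.pyGetD hG (i - 1) []) j 0 else 0) +
           PySem.List.pyGetD (PySem.List.pyGetD hG i []) j 0 +
           (if i + 1 < rows then PySem.List.pyGetD (PySem.List.pyGetD hG (i + 1) []) j 0 else 0)) - 1
        let nodes := if count < 4 then racc.2 + 1 else racc.2
        (racc.1 ++ [PySem.Int.toStr count], nodes)
      else (racc.1 ++ ["."], racc.2)) (([] : List String), acc.2)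
    (acc.1 ++ [res.1], res.2)) (([] : List (List String)), (0 : Int))

-- ===== PRECONDITION & SPEC =====
-- Pre_ excludes exactly the inputs on which A raises IndexError: the empty grid
-- (len(paper[0])) and ragged grids where some row is shorter than row 0.
def Pre_accessible (paper : List (List String)) : Prop :=
  paper ≠ [] ∧ ∀ row ∈ paper, (paper.headD []).length ≤ row.length
instance (paper : List (List String)) : Decidable (Pre_accessible paper) := by
  unfold Pre_accessible; infer_instance
def pvWitness_accessible : List (List String) := [["@", "."], [".", "@"]]

def Spec_accessible (paper : List (List String)) (out : List (List String) × Int) : Prop := out = accessible_alt paper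
instance (paper : List (List String)) (out : List (List String) × Int) : Decidable (Spec_accessible paper out) := by unfold Spec_accessible; infer_instance

-- ===== CLAIM (what is proved, stated in full; the proofs are below) =====
def Claim_equal_accessible : Prop := ∀ (paper : List (List String)), Dom_accessible paper → Pre_accessible paper → Spec_accessible paper (accessible paper)

-- ===== LEMMAS AND PROOFS =====

-- 0/1 indicator of "in-bounds '@' cell", shared by the per-cell counting lemmas below
def pvInd (paper : List (List String)) (x y : Int) : Int :=
  if 0 ≤ x ∧ x < (paper.length : Int) ∧ 0 ≤ y ∧ y < (((PySem.List.pyGet? paper 0).getD []).length : Int) ∧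
      PySem.List.pyGetD (PySem.List.pyGetD paper x []) y "" == "@" then 1 else 0

-- abbreviations for B's two stage grids (the same terms as in accessible_alt)
def pvAt (paper : List (List String)) : List (List Int) :=
  (PySem.List.pyRange 0 (paper.length : Int) 1).map (fun i =>
    (PySem.List.pyRange 0 (((PySem.List.pyGet? paper 0).getD []).length : Int) 1).map (fun j =>
      if PySem.List.pyGetD (PySem.List.pyGetD paper i []) j "" == "@" then (1 : Int) else 0))

def pvH (paper : List (List String)) : List (List Int) :=
  (pvAt paper).map (fun row =>
    (PySem.List.pyRange 0 (((PySem.List.pyGet? paper 0).getD []).length : Int) 1).map (fun j =>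
      (if 0 < j then PySem.List.pyGetD row (j - 1) 0 else 0) + PySem.List.pyGetD row j 0 +
      (if j + 1 < (((PySem.List.pyGet? paper 0).getD []).length : Int) then PySem.List.pyGetD row (j + 1) 0 else 0)))

theorem pv_stepA (paper : List (List String)) (c x y : Int) :
    (if (decide (0 ≤ x) && decide (x < (paper.length : Int)) && decide (0 ≤ y) &&
          decide (y < (((PySem.List.pyGet? paper 0).getD []).length : Int))) = true then
       if PySem.List.pyGetD (PySem.List.pyGetD paper x []) y "" == "@" then c + 1 else c
     else c) = c + pvInd paper x y := by
  unfold pvInd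
  split_ifs <;> simp_all

theorem pv_at_get (paper : List (List String)) (x y : Int)
    (hx : 0 ≤ x ∧ x < (paper.length : Int)) (hy : 0 ≤ y ∧ y < (((PySem.List.pyGet? paper 0).getD []).length : Int)) :
    PySem.List.pyGetD (PySem.List.pyGetD (pvAt paper) x []) y 0 = pvInd paper x y := by
  unfold pvAt pvInd
  rw [PySem.List.pyGetD_map_pyRange_of_nonneg _ _ _ _ hx.1 hx.2,
      PySem.List.pyGetD_map_pyRange_of_nonneg _ _ _ _ hy.1 hy.2]
  simp [hx.1, hx.2, hy.1, hy.2]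

-- an indicator for an out-of-bounds column (or row) is 0
theorem pv_ind_zero (paper : List (List String)) (x y : Int)
    (h : ¬ (0 ≤ x ∧ x < (paper.length : Int) ∧ 0 ≤ y ∧ y < (((PySem.List.pyGet? paper 0).getD []).length : Int))) :
    pvInd paper x y = 0 := by
  unfold pvInd
  rw [if_neg (by tauto)]

-- element (x, y) of the horizontal-3-sum grid is the sum of three indicators
theorem pv_h_get (paper : List (List String)) (x y : Int)
    (hx : 0 ≤ x ∧ x < (paper.length : Int)) (hy : 0 ≤ y ∧ y < (((PySem.List.pyGet? paper 0).getD []).length : Int)) :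
    PySem.List.pyGetD (PySem.List.pyGetD (pvH paper) x []) y 0 =
      pvInd paper x (y - 1) + pvInd paper x y + pvInd paper x (y + 1) := by
  unfold pvH
  rw [show (pvAt paper).map _ = (PySem.List.pyRange 0 (paper.length : Int) 1).map
        (fun i => ((PySem.List.pyRange 0 (((PySem.List.pyGet? paper 0).getD []).length : Int) 1).map (fun j =>
          (if 0 < j then PySem.List.pyGetD ((PySem.List.pyRange 0 (((PySem.List.pyGet? paper 0).getD []).length : Int) 1).map (fun j =>
              if PySem.List.pyGetD (PySem.List.pyGetD paper i []) j "" == "@" then (1 : Int) else 0)) (j - 1) 0 else 0) +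
           PySem.List.pyGetD ((PySem.List.pyRange 0 (((PySem.List.pyGet? paper 0).getD []).length : Int) 1).map (fun j =>
              if PySem.List.pyGetD (PySem.List.pyGetD paper i []) j "" == "@" then (1 : Int) else 0)) j 0 +
           (if j + 1 < (((PySem.List.pyGet? paper 0).getD []).length : Int) then
              PySem.List.pyGetD ((PySem.List.pyRange 0 (((PySem.List.pyGet? paper 0).getD []).length : Int) 1).map (fun j =>
              if PySem.List.pyGetD (PySem.List.pyGetD paper i []) j "" == "@" then (1 : Int) else 0)) (j + 1) 0 else 0))))
      from by unfold pvAt; rw [List.map_map]; rfl]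
  rw [PySem.List.pyGetD_map_pyRange_of_nonneg _ _ _ _ hx.1 hx.2,
      PySem.List.pyGetD_map_pyRange_of_nonneg _ _ _ _ hy.1 hy.2]
  -- left term
  have hL : (if 0 < y then PySem.List.pyGetD ((PySem.List.pyRange 0 (((PySem.List.pyGet? paper 0).getD []).length : Int) 1).map (fun j =>
      if PySem.List.pyGetD (PySem.List.pyGetD paper x []) j "" == "@" then (1 : Int) else 0)) (y - 1) 0 else 0) = pvInd paper x (y - 1) := by
    by_cases h0 : 0 < y
    · rw [if_pos h0, PySem.List.pyGetD_map_pyRange_of_nonneg _ _ _ _ (by omega) (by omega)]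
      unfold pvInd
      have : (0 ≤ x ∧ x < (paper.length : Int) ∧ 0 ≤ y - 1 ∧ y - 1 < (((PySem.List.pyGet? paper 0).getD []).length : Int)) := ⟨hx.1, hx.2, by omega, by omega⟩
      split_ifs <;> simp_all
    · rw [if_neg h0, pv_ind_zero paper x (y - 1) (by omega)]
  have hC : PySem.List.pyGetD ((PySem.List.pyRange 0 (((PySem.List.pyGet? paper 0).getD []).length : Int) 1).map (fun j =>
      if PySem.List.pyGetD (PySem.List.pyGetD paper x []) j "" == "@" then (1 : Int) else 0)) y 0 = pvInd paper x y := by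
    rw [PySem.List.pyGetD_map_pyRange_of_nonneg _ _ _ _ hy.1 hy.2]
    unfold pvInd
    split_ifs <;> simp_all
  have hR : (if y + 1 < (((PySem.List.pyGet? paper 0).getD []).length : Int) then
      PySem.List.pyGetD ((PySem.List.pyRange 0 (((PySem.List.pyGet? paper 0).getD []).length : Int) 1).map (fun j =>
      if PySem.List.pyGetD (PySem.List.pyGetD paper x []) j "" == "@" then (1 : Int) else 0)) (y + 1) 0 else 0) = pvInd paper x (y + 1) := by
    by_cases h0 : y + 1 < (((PySem.List.pyGet? paper 0).getD []).length : Int)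
    · rw [if_pos h0, PySem.List.pyGetD_map_pyRange_of_nonneg _ _ _ _ (by omega) h0]
      unfold pvInd
      split_ifs <;> simp_all <;> omega
    · rw [if_neg h0, pv_ind_zero paper x (y + 1) (by omega)]
  rw [hL, hC, hR]

-- a guarded vertical access to the h-grid: out-of-bounds rows contribute 0, matching
-- the vanishing of the corresponding indicators
theorem pv_h_row (paper : List (List String)) (x y : Int)
    (hy : 0 ≤ y ∧ y < (((PySem.List.pyGet? paper 0).getD []).length : Int)) :
    (if 0 ≤ x ∧ x < (paper.length : Int) then PySem.List.pyGetD (PySem.List.pyGetD (pvH paper) x []) y 0 else 0) =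
      pvInd paper x (y - 1) + pvInd paper x y + pvInd paper x (y + 1) := by
  by_cases hx : 0 ≤ x ∧ x < (paper.length : Int)
  · rw [if_pos hx, pv_h_get paper x y hx hy]
  · rw [if_neg hx, pv_ind_zero paper x (y - 1) (by omega), pv_ind_zero paper x y (by omega),
        pv_ind_zero paper x (y + 1) (by omega)]
    ring

-- A's gather count over the 8-direction list equals B's 3x3 box sum minus the cell
theorem pv_count_eq (paper : List (List String)) (i j : Int)
    (hi : 0 ≤ i ∧ i < (paper.length : Int)) (hj : 0 ≤ j ∧ j < (((PySem.List.pyGet? paper 0).getD []).length : Int))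
    (hc : PySem.List.pyGetD (PySem.List.pyGetD paper i []) j "" == "@") :
    ([((-1 : Int), (-1 : Int)), (-1, 0), (-1, 1), (0, -1), (0, 1), (1, -1), (1, 0), (1, 1)].foldl
      (fun c d =>
        if decide (0 ≤ i + d.1) && decide (i + d.1 < (paper.length : Int)) && decide (0 ≤ j + d.2) &&
            decide (j + d.2 < (((PySem.List.pyGet? paper 0).getD []).length : Int)) then
          if PySem.List.pyGetD (PySem.List.pyGetD paper (i + d.1) []) (j + d.2) "" == "@" then c + 1 else c
        else c) (0 : Int)) =
    ((if 0 < i then PySem.List.pyGetD (PySem.List.pyGetD (pvH paper) (i - 1) []) j 0 else 0) +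
     PySem.List.pyGetD (PySem.List.pyGetD (pvH paper) i []) j 0 +
     (if i + 1 < (paper.length : Int) then PySem.List.pyGetD (PySem.List.pyGetD (pvH paper) (i + 1) []) j 0 else 0)) - 1 := by
  have hT : (if 0 < i then PySem.List.pyGetD (PySem.List.pyGetD (pvH paper) (i - 1) []) j 0 else 0) =
      pvInd paper (i - 1) (j - 1) + pvInd paper (i - 1) j + pvInd paper (i - 1) (j + 1) := by
    rw [show (if 0 < i then PySem.List.pyGetD (PySem.List.pyGetD (pvH paper) (i - 1) []) j 0 else 0) =
        (if 0 ≤ i - 1 ∧ i - 1 < (paper.length : Int) then PySem.List.pyGetD (PySem.List.pyGetD (pvH paper) (i - 1) []) j 0 else 0)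
      from by split_ifs <;> first | rfl | omega]
    exact pv_h_row paper (i - 1) j hj
  have hM : PySem.List.pyGetD (PySem.List.pyGetD (pvH paper) i []) j 0 =
      pvInd paper i (j - 1) + pvInd paper i j + pvInd paper i (j + 1) := pv_h_get paper i j hi hj
  have hB : (if i + 1 < (paper.length : Int) then PySem.List.pyGetD (PySem.List.pyGetD (pvH paper) (i + 1) []) j 0 else 0) =
      pvInd paper (i + 1) (j - 1) + pvInd paper (i + 1) j + pvInd paper (i + 1) (j + 1) := by
    rw [show (if i + 1 < (paper.length : Int) then PySem.List.pyGetD (PySem.List.pyGetD (pvH paper) (i + 1) []) j 0 else 0) =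
        (if 0 ≤ i + 1 ∧ i + 1 < (paper.length : Int) then PySem.List.pyGetD (PySem.List.pyGetD (pvH paper) (i + 1) []) j 0 else 0)
      from by split_ifs <;> first | rfl | omega]
    exact pv_h_row paper (i + 1) j hj
  have hCen : pvInd paper i j = 1 := by
    unfold pvInd
    rw [if_pos ⟨hi.1, hi.2, hj.1, hj.2, hc⟩]
  simp only [List.foldl, pv_stepA]
  rw [hT, hM, hB]
  simp only [show i + (-1 : Int) = i - 1 from by ring, show j + (-1 : Int) = j - 1 from by ring, add_zero]
  omega

theorem accessible_eq (paper : List (List String)) : accessible paper = accessible_alt paper := by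
  simp only [accessible, accessible_alt]
  rw [show ((PySem.List.pyRange 0 (paper.length : Int) 1).map (fun i =>
      (PySem.List.pyRange 0 (((PySem.List.pyGet? paper 0).getD []).length : Int) 1).map (fun j =>
        if PySem.List.pyGetD (PySem.List.pyGetD paper i []) j "" == "@" then (1 : Int) else 0))) = pvAt paper from rfl]
  apply PySem.List.foldl_congr_mem
  intro acc i hi
  rw [PySem.List.mem_pyRange_one] at hi
  refine congrArg (fun r : List String × Int => (acc.1 ++ [r.1], r.2)) ?_
  apply PySem.List.foldl_congr_mem
  intro racc j hj
  rw [PySem.List.mem_pyRange_one] at hj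
  have hat : PySem.List.pyGetD (PySem.List.pyGetD (pvAt paper) i []) j 0 = pvInd paper i j :=
    pv_at_get paper i j ⟨hi.1, hi.2⟩ ⟨hj.1, hj.2⟩
  by_cases hc : (PySem.List.pyGetD (PySem.List.pyGetD paper i []) j "" == "@") = true
  · have hne : PySem.List.pyGetD (PySem.List.pyGetD (pvAt paper) i []) j 0 ≠ 0 := by
      rw [hat]; unfold pvInd; rw [if_pos ⟨hi.1, hi.2, hj.1, hj.2, hc⟩]; omega
    rw [if_pos hc, if_pos hne,
        show ((pvAt paper).map _ : List (List Int)) = pvH paper from rfl,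
        pv_count_eq paper i j ⟨hi.1, hi.2⟩ ⟨hj.1, hj.2⟩ hc]
  · have hz : ¬ PySem.List.pyGetD (PySem.List.pyGetD (pvAt paper) i []) j 0 ≠ 0 := by
      rw [hat]; unfold pvInd
      rw [if_neg (by simp [hc])]
      omega
    rw [if_neg hc, if_neg hz]

-- ===== VERDICT (by name: the statement is the Claim_ definition above) =====
theorem accessible_spec : Claim_equal_accessible := by
  intro paper _ _
  unfold Spec_accessible
  exact accessible_eq paper
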